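-- pv_equiv track=rewrite | github.com/dxviidmg/winning-card | winning_card.py | winning_card
-- ===== SOURCE A (Python) =====
-- def winning_card(cards):
--     res = -1
--     for player_cards in cards:
--         aux = {}
--         for card in player_cards:
--             if card in aux:
--                 aux[card] += 1
--             else:
--                 aux[card] = 1
--
--         aux = {k: v for k, v in aux.items() if v == 1}
--
--         if aux == {}:
--             continue
--         pos_max = max(aux.keys())
--         if pos_max > res:
--             res = pos_max
--
--     return res
-- ===== SOURCE B (Python) =====
-- def winning_card(cards):
--     res = -1
--     for hand in cards:
--         s = sorted(hand)
--         best = None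
--         for i in range(len(s)):
--             if (i == 0 or s[i - 1] != s[i]) and (i == len(s) - 1 or s[i] != s[i + 1]):
--                 best = s[i]  # s is ascending, so the last singleton seen is the largest
--         if best is not None and best > res:
--             res = best
--     return res
-- ===== Notes on version B (the rewrite author's own statement) =====
-- stated objective: alternative
-- what changed: Replaces the per-hand frequency dict + dict-comprehension filter + max(keys) with sorting a copy of each hand and one adjacency scan that keeps the last (hence largest) element unequal to both neighbours.
import Mathlib
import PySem

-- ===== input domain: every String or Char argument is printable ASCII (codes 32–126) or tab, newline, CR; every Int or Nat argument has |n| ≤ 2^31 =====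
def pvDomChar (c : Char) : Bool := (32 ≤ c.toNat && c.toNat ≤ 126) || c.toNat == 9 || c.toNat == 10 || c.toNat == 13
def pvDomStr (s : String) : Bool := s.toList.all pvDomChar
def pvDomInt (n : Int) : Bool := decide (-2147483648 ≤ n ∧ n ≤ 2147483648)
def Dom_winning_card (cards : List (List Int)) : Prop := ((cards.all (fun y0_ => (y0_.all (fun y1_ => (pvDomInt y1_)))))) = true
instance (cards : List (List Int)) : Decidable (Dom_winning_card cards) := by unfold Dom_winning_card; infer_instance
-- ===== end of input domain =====

-- B replaces A's per-hand frequency dict + filter + max(keys) by sorting a copy of the hand and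
-- one adjacency scan keeping the last (hence largest) element unequal to both neighbours; alternative, same result.

-- ===== PORT A =====
-- A's per-hand counting loop: aux = {}; for card: aux[card] += 1 / = 1
def pvCountA (player_cards : List Int) : PySem.Dict Int Int :=
  player_cards.foldl
    (fun aux card => if aux.contains card then aux.modify card 0 (· + 1) else aux.insert card 1)
    PySem.Dict.empty

-- A's dict comprehension {k: v for k, v in aux.items() if v == 1}
def pvOnesA (aux : PySem.Dict Int Int) : PySem.Dict Int Int :=
  aux.items.foldl (fun d kv => if kv.2 == 1 then d.insert kv.1 kv.2 else d) PySem.Dict.empty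

def winning_card (cards : List (List Int)) : Int :=
  cards.foldl
    (fun res player_cards =>
      let aux := pvOnesA (pvCountA player_cards)
      if aux.items = [] then res          -- aux == {}: continue
      else
        -- max(aux.keys()): the guard makes keys nonempty, so max? is some
        match PySem.List.max? aux.keys (fun k => k) with
        | some pos_max => if pos_max > res then pos_max else res
        | none => res)
    (-1)

-- ===== PORT B =====
-- B's inner scan over the sorted hand: keep the last element unequal to both neighbours
def pvScanBest (s : List Int) : Option Int :=
  (PySem.List.pyRange 0 (PySem.List.len s) 1).foldl
    (fun best i =>
      if ((i == 0) || !(PySem.List.pyGetD s (i - 1) 0 == PySem.List.pyGetD s i 0))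
          && ((i == PySem.List.len s - 1) || !(PySem.List.pyGetD s i 0 == PySem.List.pyGetD s (i + 1) 0))
      then some (PySem.List.pyGetD s i 0)
      else best)
    none

def winning_card_alt (cards : List (List Int)) : Int :=
  cards.foldl
    (fun res hand =>
      match pvScanBest (PySem.List.sorted hand (fun x => x) false) with
      | some best => if best > res then best else res
      | none => res)
    (-1)

-- ===== PRECONDITION & SPEC =====
def Spec_winning_card (cards : List (List Int)) (out : Int) : Prop := out = winning_card_alt cards
instance (cards : List (List Int)) (out : Int) : Decidable (Spec_winning_card cards out) := by unfold Spec_winning_card; infer_instance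

-- ===== CLAIM (what is proved, stated in full; the proofs are below) =====
def Claim_equal_winning_card : Prop := ∀ (cards : List (List Int)), Dom_winning_card cards → Spec_winning_card cards (winning_card cards)


-- ===== LEMMAS AND PROOFS =====

-- A's counting loop is Counter(hand)
lemma pvCountA_eq_counter (hand : List Int) : pvCountA hand = PySem.Dict.counter hand := by
  rw [PySem.Dict.counter_eq_foldl, pvCountA]
  refine PySem.List.foldl_congr_mem _ _ _ _ ?_
  intro d card _
  by_cases h : d.contains card
  · simp [h]
  · simp only [Bool.not_eq_true] at h
    simp [h, PySem.Dict.modify, PySem.Dict.getD_of_not_contains d _ h]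

-- the items of A's filtered dict, in closed form
lemma pvOnesA_items (hand : List Int) :
    (pvOnesA (PySem.Dict.counter hand)).items
      = ((PySem.Set.ofList hand).filter (fun k => ((hand.count k : Int)) == 1)).map
          (fun k => (k, (hand.count k : Int))) := by
  rw [pvOnesA, PySem.Dict.items_counter, List.foldl_map]
  rw [show (fun (d : PySem.Dict Int Int) k => if ((hand.count k : Int)) == 1 then d.insert k ((hand.count k : Int)) else d)
        = (fun d k => if (fun k => ((hand.count k : Int)) == 1) k then (fun d k => d.insert k ((hand.count k : Int))) d k else d) from rfl]
  rw [PySem.List.foldl_if_eq_foldl_filter]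
  rw [PySem.Dict.items_foldl_insert_fresh _ (fun k => k) (fun k => ((hand.count k : Int)))]
  · simp [PySem.Dict.empty]
  · intro a _; exact PySem.Dict.contains_empty a
  · simpa using (PySem.Set.nodup_ofList hand).filter _

-- membership in A's singleton keys
lemma mem_keys_ones (hand : List Int) (x : Int) :
    x ∈ (pvOnesA (PySem.Dict.counter hand)).keys ↔ x ∈ hand ∧ hand.count x = 1 := by
  simp only [PySem.Dict.keys, pvOnesA_items, List.map_map, List.mem_map, Function.comp]
  constructor
  · rintro ⟨k, hk, rfl⟩
    simp only [List.mem_filter, PySem.Set.mem_ofList, beq_iff_eq] at hk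
    exact ⟨hk.1, by exact_mod_cast hk.2⟩
  · rintro ⟨hx, hc⟩
    exact ⟨x, by simp [List.mem_filter, PySem.Set.mem_ofList, hx, hc], rfl⟩

-- the last element of a (≤)-pairwise list bounds all elements
lemma le_getLast_of_pairwise {l : List Int} (h : l.Pairwise (· ≤ ·)) {g : Int}
    (hg : l.getLast? = some g) : ∀ y ∈ l, y ≤ g := by
  obtain ⟨ys, rfl⟩ := List.getLast?_eq_some_iff.mp hg
  rw [List.pairwise_append] at h
  intro y hy
  rcases List.mem_append.mp hy with hy | hy
  · exact h.2.2 y hy g (by simp)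
  · simp at hy; simp [hy]

-- adjacency characterisation of singletons in a sorted list
lemma count_one_iff_adj (s : List Int) (hs : s.Pairwise (· ≤ ·)) (k : Nat) (hk : k < s.length) :
    s.count s[k] = 1 ↔
      ((k = 0 ∨ s.getD (k - 1) 0 ≠ s[k]) ∧ (k = s.length - 1 ∨ s[k] ≠ s.getD (k + 1) 0)) := by
  have mono : ∀ i j (_ : i < j) (hj : j < s.length), s[i]'(by omega) ≤ s[j] := by
    intro i j hij hj
    exact List.pairwise_iff_getElem.mp hs i j (by omega) hj hij
  have hsplit : s = s.take k ++ s[k] :: s.drop (k + 1) := by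
    rw [List.getElem_cons_drop hk, List.take_append_drop]
  have hcount : ∀ x : Int, x = s[k] → s.count x = (s.take k).count x + 1 + (s.drop (k+1)).count x := by
    intro x hx
    conv_lhs => rw [hsplit]
    subst hx
    rw [List.count_append, List.count_cons_self]
    omega
  have h1 : s[k] ∉ s.take k ↔ (k = 0 ∨ s.getD (k - 1) 0 ≠ s[k]) := by
    rcases Nat.eq_zero_or_pos k with h0 | h0
    · simp [h0]
    · have hk1 : k - 1 < s.length := by omega
      rw [List.getD_eq_getElem s 0 hk1]
      constructor
      · intro hn
        right; intro he
        exact hn (List.mem_take_iff_getElem.mpr ⟨k - 1, by omega, he⟩)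
      · rintro (h | h)
        · omega
        · intro hmem
          obtain ⟨j, hj, hje⟩ := List.mem_take_iff_getElem.mp hmem
          apply h
          have h2 : s[j]'(by omega) ≤ s[k - 1] := by
            rcases Nat.lt_or_ge j (k-1) with hlt | hge
            · exact mono j (k-1) hlt hk1
            · have : j = k - 1 := by omega
              subst this; rfl
          have h3 : s[k-1] ≤ s[k] := mono (k-1) k (by omega) hk
          have := hje ▸ h2
          omega
  have h2 : s[k] ∉ s.drop (k+1) ↔ (k = s.length - 1 ∨ s[k] ≠ s.getD (k + 1) 0) := by
    rcases Nat.lt_or_ge (k+1) s.length with hlt | hge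
    · rw [List.getD_eq_getElem s 0 hlt]
      constructor
      · intro hn
        right; intro he
        apply hn
        rw [List.mem_iff_getElem]
        refine ⟨0, by simp; omega, ?_⟩
        simpa using he.symm
      · rintro (h | h)
        · omega
        · intro hmem
          rw [List.mem_iff_getElem] at hmem
          obtain ⟨i, hi, hie⟩ := hmem
          simp only [List.getElem_drop] at hie
          apply h
          have h3 : s[k+1] ≤ s[k+1+i]'(by simp at hi; omega) := by
            rcases Nat.eq_zero_or_pos i with h0 | h0
            · subst h0; rfl
            · exact mono (k+1) (k+1+i) (by omega) (by simp at hi; omega)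
          have h4 : s[k] ≤ s[k+1] := mono k (k+1) (by omega) hlt
          have := hie ▸ h3
          omega
    · have h0 : s.drop (k+1) = [] := List.drop_eq_nil_of_le (by omega)
      simp [h0]
      omega
  rw [hcount s[k] rfl]
  have t1 : (s.take k).count s[k] = 0 ↔ s[k] ∉ s.take k := List.count_eq_zero
  have t2 : (s.drop (k+1)).count s[k] = 0 ↔ s[k] ∉ s.drop (k+1) := List.count_eq_zero
  rw [← h1, ← h2, ← t1, ← t2]
  omega

-- the port's adjacency test, at a natural index, is the singleton test
lemma cond_eq (s : List Int) (hs : s.Pairwise (· ≤ ·)) (k : Nat) (hk : k < s.length) :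
    ((((k : Int) == 0) || !(PySem.List.pyGetD s ((k:Int) - 1) 0 == PySem.List.pyGetD s (k:Int) 0))
      && (((k:Int) == (s.length : Int) - 1) || !(PySem.List.pyGetD s (k:Int) 0 == PySem.List.pyGetD s ((k:Int) + 1) 0)))
      = decide (s.count (s.getD k 0) = 1) := by
  have hadj := count_one_iff_adj s hs k hk
  rw [List.getD_eq_getElem s 0 hk]
  rw [Bool.eq_iff_iff]
  have e1 : ((k:Int) + 1) = ((k+1 : Nat) : Int) := by push_cast; ring
  simp only [e1, PySem.List.pyGetD_natCast, Bool.and_eq_true, Bool.or_eq_true, beq_iff_eq,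
    Bool.not_eq_true', beq_eq_false_iff_ne, decide_eq_true_eq, hadj, List.getD_eq_getElem?_getD,
    List.getElem?_eq_getElem hk, Option.getD_some]
  constructor
  · rintro ⟨h1, h2⟩
    constructor
    · rcases h1 with h | h
      · left; omega
      · by_cases h0 : k = 0
        · left; exact h0
        · right
          have e0 : ((k:Int) - 1) = ((k-1 : Nat) : Int) := by omega
          rw [e0, PySem.List.pyGetD_natCast] at h
          simpa [List.getD_eq_getElem?_getD] using h
    · rcases h2 with h | h
      · left; omega
      · right
        by_cases hl : k + 1 < s.length
        · simpa [List.getD_eq_getElem?_getD, List.getElem?_eq_getElem hl] using h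
        · omega
  · rintro ⟨h1, h2⟩
    constructor
    · rcases h1 with h | h
      · left; omega
      · by_cases h0 : k = 0
        · left; omega
        · right
          have e0 : ((k:Int) - 1) = ((k-1 : Nat) : Int) := by omega
          rw [e0, PySem.List.pyGetD_natCast]
          simpa [List.getD_eq_getElem?_getD] using h
    · rcases h2 with h | h
      · left; omega
      · right
        by_cases hl : k + 1 < s.length
        · simpa [List.getD_eq_getElem?_getD, List.getElem?_eq_getElem hl] using h
        · omega

-- the scan fold keeps the last selected element
lemma foldl_last_some {α β : Type} (l : List α) (f : α → β) (init : Option β) :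
    l.foldl (fun _ x => some (f x)) init
      = match l.getLast? with | some x => some (f x) | none => init := by
  induction l using List.reverseRecOn with
  | nil => rfl
  | append_singleton l x _ => simp [List.foldl_append]

-- pvScanBest in closed form: the last element of the singleton sublist of s
lemma pvScanBest_eq (s : List Int) (hs : s.Pairwise (· ≤ ·)) :
    pvScanBest s
      = match (((List.range s.length).filter (fun k => decide (s.count (s.getD k 0) = 1))).map
            (fun k => s.getD k 0)).getLast? with
        | some g => some g | none => none := by
  rw [pvScanBest, PySem.List.len_eq, PySem.List.pyRange_zero_nat, List.foldl_map]
  rw [PySem.List.foldl_congr_mem _ _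
    (fun (best : Option Int) (k : Nat) =>
      if decide (s.count (s.getD k 0) = 1) then some (s.getD k 0) else best) _ ?hcongr]
  case hcongr =>
    intro best k hkmem
    have hk : k < s.length := List.mem_range.mp hkmem
    rw [cond_eq s hs k hk, PySem.List.pyGetD_natCast]
  rw [show (fun (best : Option Int) (k : Nat) =>
        if decide (s.count (s.getD k 0) = 1) then some (s.getD k 0) else best)
      = (fun best k => if (fun k => decide (s.count (s.getD k 0) = 1)) k
          then (fun (_ : Option Int) k => some (s.getD k 0)) best k else best) from rfl]
  rw [PySem.List.foldl_if_eq_foldl_filter]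
  rw [foldl_last_some _ (fun k => s.getD k 0) none]
  rw [List.getLast?_map]
  cases ((List.range s.length).filter (fun k => decide (s.count (s.getD k 0) = 1))).getLast? <;> simp

-- per-hand agreement of the two step functions
lemma step_eq (res : Int) (hand : List Int) :
    (let aux := pvOnesA (pvCountA hand)
     if aux.items = [] then res
     else
       match PySem.List.max? aux.keys (fun k => k) with
       | some pos_max => if pos_max > res then pos_max else res
       | none => res)
      = match pvScanBest (PySem.List.sorted hand (fun x => x) false) with
        | some best => if best > res then best else res
        | none => res := by
  have hs := PySem.List.sorted_pairwise hand (fun x => x)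
  have hperm := PySem.List.sorted_perm hand (fun x => x) false
  set s := PySem.List.sorted hand (fun x => x) false with hsdef
  rw [pvScanBest_eq s hs]
  rw [pvCountA_eq_counter]
  set L := (((List.range s.length).filter (fun k => decide (s.count (s.getD k 0) = 1))).map
      (fun k => s.getD k 0)) with hLdef
  have memFL : ∀ x : Int, x ∈ L ↔ x ∈ hand ∧ hand.count x = 1 := by
    intro x
    rw [hLdef]
    constructor
    · rintro hx
      obtain ⟨k, hkf, rfl⟩ := List.mem_map.mp hx
      obtain ⟨hkr, hq⟩ := List.mem_filter.mp hkf
      have hk : k < s.length := List.mem_range.mp hkr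
      rw [List.getD_eq_getElem s 0 hk] at hq ⊢
      have hc : s.count s[k] = 1 := by simpa using hq
      refine ⟨hperm.mem_iff.mp (List.getElem_mem hk), ?_⟩
      rw [← hperm.count_eq]
      exact hc
    · rintro ⟨hx, hc⟩
      have hxs : x ∈ s := hperm.mem_iff.mpr hx
      obtain ⟨k, hk, rfl⟩ := List.mem_iff_getElem.mp hxs
      refine List.mem_map.mpr ⟨k, List.mem_filter.mpr ⟨List.mem_range.mpr hk, ?_⟩, ?_⟩
      · rw [List.getD_eq_getElem s 0 hk]
        simpa [hperm.count_eq] using hc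
      · rw [List.getD_eq_getElem s 0 hk]
  have memiff : ∀ x : Int, x ∈ L ↔ x ∈ (pvOnesA (PySem.Dict.counter hand)).keys := by
    intro x; rw [memFL, mem_keys_ones]
  have hLpair : L.Pairwise (· ≤ ·) := by
    rw [hLdef, List.pairwise_map]
    refine List.Pairwise.imp_of_mem ?_
      (List.Pairwise.sublist List.filter_sublist List.pairwise_lt_range)
    intro a b ha hb hab
    have ha' : a < s.length := List.mem_range.mp (List.mem_of_mem_filter ha)
    have hb' : b < s.length := List.mem_range.mp (List.mem_of_mem_filter hb)
    rw [List.getD_eq_getElem s 0 ha', List.getD_eq_getElem s 0 hb']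
    exact List.pairwise_iff_getElem.mp hs a b (by omega) hb' hab
  have hempty : (pvOnesA (PySem.Dict.counter hand)).items = []
      ↔ (pvOnesA (PySem.Dict.counter hand)).keys = [] := by
    simp [PySem.Dict.keys, List.map_eq_nil_iff]
  cases hL : L.getLast? with
  | none =>
    have hLnil : L = [] := List.getLast?_eq_none_iff.mp hL
    have hknil : (pvOnesA (PySem.Dict.counter hand)).keys = [] := by
      rw [List.eq_nil_iff_forall_not_mem]
      intro x hx
      rw [← memiff, hLnil] at hx
      exact (List.not_mem_nil).elim hx
    simp [hempty.mpr hknil]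
  | some g =>
    have hgL : g ∈ L := by
      obtain ⟨ys, hys⟩ := List.getLast?_eq_some_iff.mp hL
      rw [hys]; simp
    have hknn : (pvOnesA (PySem.Dict.counter hand)).keys ≠ [] := by
      intro h
      have := (memiff g).mp hgL
      rw [h] at this
      exact (List.not_mem_nil) this
    have hinn : ¬ (pvOnesA (PySem.Dict.counter hand)).items = [] := fun h => hknn (hempty.mp h)
    obtain ⟨m, hm⟩ : ∃ m, PySem.List.max? (pvOnesA (PySem.Dict.counter hand)).keys (fun k => k) = some m := by
      cases hmx : PySem.List.max? (pvOnesA (PySem.Dict.counter hand)).keys (fun k => k) with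
      | none => exact absurd ((PySem.List.max?_eq_none_iff _ _).mp hmx) hknn
      | some m => exact ⟨m, rfl⟩
    have hmg : m = g := by
      have h1 : g ≤ m := PySem.List.max?_isMax hm g ((memiff g).mp hgL)
      have h2 : m ≤ g :=
        le_getLast_of_pairwise hLpair hL m ((memiff m).mpr (PySem.List.max?_mem hm))
      omega
    simp [hinn, hm, hmg]

-- ===== VERDICT (by name: the statement is the Claim_ definition above) =====
theorem winning_card_spec : Claim_equal_winning_card := by
  intro cards _
  unfold Spec_winning_card winning_card winning_card_alt
  exact PySem.List.foldl_congr_mem _ _ _ _ (fun res hand _ => step_eq res hand)
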